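-- pv_equiv track=rewrite | github.com/AlexEnersen/VTAPS | game/views.py | setHybrid
-- ===== SOURCE A (Python) =====
-- def setHybrid(content, hybrid):
--     isCultivar = False
--     newContent = []
--     for line in content:
--         items =  list(filter(None, line.split(" ")))
--         if isCultivar:
--             newLine = f" 1 MZ {hybrid}"
--             newContent.append(newLine)
--             isCultivar = False
--         else:
--             newContent.append(line)
--
--         if len(items) == 4 and items[2] == 'INGENO':
--             isCultivar = True
--
--     return newContent
-- ===== SOURCE B (Python) =====
-- def _isIngeno(line):
--     items = list(filter(None, line.split(" ")))
--     return len(items) == 4 and items[2] == 'INGENO'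
--
--
-- def setHybrid(content, hybrid):
--     # Build the result back-to-front: walk the lines in reverse; when a marker
--     # line is seen, overwrite the line that was just emitted (its successor in
--     # the original order), then emit the current line.  Finally un-reverse.
--     out = []
--     for line in reversed(content):
--         if _isIngeno(line) and out:
--             out[-1] = f" 1 MZ {hybrid}"
--         out.append(line)
--     return out[::-1]
-- ===== Notes on version B (the rewrite author's own statement) =====
-- stated objective: alternative
-- what changed: Builds the output back-to-front: iterates over the lines in reverse and, when a marker line is seen, overwrites the already-emitted successor line in the accumulator, instead of A's forward pass carrying a 'replace the next line' flag.
import Mathlib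
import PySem

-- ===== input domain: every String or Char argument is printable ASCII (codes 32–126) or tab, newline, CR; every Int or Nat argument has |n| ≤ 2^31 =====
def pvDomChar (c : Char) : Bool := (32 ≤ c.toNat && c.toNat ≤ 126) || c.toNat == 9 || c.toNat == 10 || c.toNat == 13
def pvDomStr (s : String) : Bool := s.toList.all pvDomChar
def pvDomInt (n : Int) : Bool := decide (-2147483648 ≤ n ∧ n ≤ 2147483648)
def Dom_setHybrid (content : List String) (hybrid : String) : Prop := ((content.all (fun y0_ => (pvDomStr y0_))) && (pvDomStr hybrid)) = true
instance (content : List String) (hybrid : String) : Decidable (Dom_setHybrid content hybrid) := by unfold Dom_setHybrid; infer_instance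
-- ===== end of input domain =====

-- B is an alternative decomposition (builds the output back-to-front, patching the just-emitted line), not faster.
-- ===== PORT A =====
-- Port of A: forward fold carrying (isCultivar, newContent); the INGENO test runs on the current line after the replacement branch.
def setHybrid (content : List String) (hybrid : String) : List String :=
  (content.foldl (fun st line =>
      let items := ((PySem.Str.split? line " ").getD []).filter (fun s => s ≠ "")
      let st1 : Bool × List String :=
        if st.1 then (false, st.2 ++ [" 1 MZ " ++ hybrid])
        else (st.1, st.2 ++ [line])
      if items.length == 4 && items.getD 2 "" == "INGENO" then (true, st1.2) else st1)
    (false, ([] : List String))).2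

-- ===== PORT B =====
-- B helper: is this line an INGENO marker line?
def isIngeno (line : String) : Bool :=
  let items := ((PySem.Str.split? line " ").getD []).filter (fun s => s ≠ "")
  items.length == 4 && items.getD 2 "" == "INGENO"

-- Port of B: fold over the reversed list; `out[-1] = …` is `out.set (out.length - 1) …`
-- (guarded by non-emptiness as in Source B), `out[::-1]` at the end is `.reverse` (exact).
def setHybrid_alt (content : List String) (hybrid : String) : List String :=
  (content.reverse.foldl (fun out line =>
      (if isIngeno line && !out.isEmpty then out.set (out.length - 1) (" 1 MZ " ++ hybrid) else out)
        ++ [line])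
    ([] : List String)).reverse

-- ===== PRECONDITION & SPEC =====
def Spec_setHybrid (content : List String) (hybrid : String) (out : List String) : Prop := out = setHybrid_alt content hybrid
instance (content : List String) (hybrid : String) (out : List String) : Decidable (Spec_setHybrid content hybrid out) := by unfold Spec_setHybrid; infer_instance

-- ===== CLAIM (what is proved, stated in full; the proofs are below) =====
def Claim_equal_setHybrid : Prop := ∀ (content : List String) (hybrid : String), Dom_setHybrid content hybrid → Spec_setHybrid content hybrid (setHybrid content hybrid)

-- ===== LEMMAS AND PROOFS =====

-- reference recursion: process lines with an explicit "previous line was INGENO" flag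
def goSH (hybrid : String) : Bool → List String → List String
  | _, [] => []
  | b, x :: xs => (if b then " 1 MZ " ++ hybrid else x) :: goSH hybrid (isIngeno x) xs

lemma step_simp (hybrid : String) (st : Bool × List String) (line : String) :
    (let items := ((PySem.Str.split? line " ").getD []).filter (fun s => s ≠ "")
     let st1 : Bool × List String :=
       if st.1 then (false, st.2 ++ [" 1 MZ " ++ hybrid])
       else (st.1, st.2 ++ [line])
     if items.length == 4 && items.getD 2 "" == "INGENO" then (true, st1.2) else st1)
    = (isIngeno line, st.2 ++ [if st.1 then " 1 MZ " ++ hybrid else line]) := by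
  rcases st with ⟨b, acc⟩
  cases b <;> simp only [isIngeno] <;> split <;> rename_i h <;> simp_all
  all_goals
    obtain ⟨h1, h2⟩ := h
    rw [List.getElem?_eq_getElem (by omega)] at h2
    simpa using h2

lemma foldl_eq_go (hybrid : String) (l : List String) : ∀ (b : Bool) (acc : List String),
    (l.foldl (fun st line =>
      let items := ((PySem.Str.split? line " ").getD []).filter (fun s => s ≠ "")
      let st1 : Bool × List String :=
        if st.1 then (false, st.2 ++ [" 1 MZ " ++ hybrid])
        else (st.1, st.2 ++ [line])
      if items.length == 4 && items.getD 2 "" == "INGENO" then (true, st1.2) else st1)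
      (b, acc)).2 = acc ++ goSH hybrid b l := by
  induction l with
  | nil => intro b acc; simp [goSH]
  | cons x xs ih =>
      intro b acc
      rw [List.foldl_cons, step_simp, ih]
      simp [goSH]

-- flipping the incoming flag only rewrites the first emitted line
lemma goSH_true (hybrid : String) (l : List String) :
    goSH hybrid true l = (goSH hybrid false l).set 0 (" 1 MZ " ++ hybrid) := by
  cases l <;> simp [goSH]

-- reversing turns a write at position 0 into a write at the last position
lemma rev_set_zero (l : List String) (a : String) :
    (l.set 0 a).reverse = l.reverse.set (l.reverse.length - 1) a := by
  cases l with
  | nil => simp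
  | cons x xs =>
      simp

-- B's reverse fold computes the reverse of the reference recursion
lemma foldB_eq_go (hybrid : String) (l : List String) :
    (l.reverse.foldl (fun out line =>
      (if isIngeno line && !out.isEmpty then out.set (out.length - 1) (" 1 MZ " ++ hybrid) else out)
        ++ [line])
      ([] : List String)) = (goSH hybrid false l).reverse := by
  induction l with
  | nil => simp [goSH]
  | cons x xs ih =>
      rw [List.reverse_cons, List.foldl_append, ih, List.foldl_cons, List.foldl_nil]
      by_cases h : isIngeno x
      · have hne : ((goSH hybrid false xs).reverse.isEmpty = false) ∨ xs = [] := by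
          cases xs with
          | nil => exact Or.inr rfl
          | cons y ys => exact Or.inl (by simp [goSH])
        cases hne with
        | inl hne =>
            simp only [h, hne, Bool.not_false, Bool.and_self, goSH,
              List.reverse_cons]
            rw [← rev_set_zero, ← goSH_true]
            simp
        | inr hxs => subst hxs; simp [goSH]
      · simp [goSH, h]

-- ===== VERDICT (by name: the statement is the Claim_ definition above) =====
theorem setHybrid_spec : Claim_equal_setHybrid := by
  intro content hybrid _
  unfold Spec_setHybrid setHybrid setHybrid_alt
  rw [foldl_eq_go, foldB_eq_go]
  simp
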